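-- pv_equiv track=rewrite | github.com/mvrcii/gesture_classifier | inference/live_video_feed.py | find_frame_index_ms_ago
-- ===== SOURCE A (Python) =====
-- def find_frame_index_ms_ago(timestamps, millis):
--     """ Returns the index of the first timestamp (searching backwards from the newest, which is longer than
--     WINDOW_SIZE ago, returns -1 if no timestamp with a large enough delta can be found"""
--     i = len(timestamps) - 1
--     while i >= 0:
--         # search backwards from the current frame, up to a frame that was 2 seconds ago
--         i = i - 1
--         dif = timestamps[-1] - timestamps[i]
--         if dif > millis:
--             return i
--     return -1
-- ===== SOURCE B (Python) =====
-- def find_frame_index_ms_ago(timestamps, millis):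
--     if not timestamps:
--         return -1
--     last = timestamps[-1]
--     best = -1
--     for i, t in enumerate(timestamps[:-1]):
--         if last - t > millis:
--             best = i
--     return best
-- ===== Notes on version B (the rewrite author's own statement) =====
-- stated objective: alternative
-- what changed: Replaced A's backward while-loop with early return (and its off-the-front -1 index probe) by a single forward pass over enumerate(timestamps[:-1]) that keeps the last matching index in an accumulator.
import Mathlib
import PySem

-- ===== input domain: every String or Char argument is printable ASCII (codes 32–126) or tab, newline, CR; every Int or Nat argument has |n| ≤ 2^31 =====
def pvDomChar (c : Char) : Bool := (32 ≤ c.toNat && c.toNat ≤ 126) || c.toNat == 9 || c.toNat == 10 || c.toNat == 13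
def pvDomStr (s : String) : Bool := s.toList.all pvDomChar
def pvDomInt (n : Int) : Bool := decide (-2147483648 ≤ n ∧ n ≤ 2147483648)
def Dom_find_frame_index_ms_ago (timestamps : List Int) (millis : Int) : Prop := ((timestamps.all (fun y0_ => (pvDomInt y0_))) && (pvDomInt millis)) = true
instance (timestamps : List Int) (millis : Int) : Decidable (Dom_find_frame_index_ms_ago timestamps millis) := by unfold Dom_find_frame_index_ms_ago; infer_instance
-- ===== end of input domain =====

-- B replaces A's backward early-return while loop by a single forward pass keeping the
-- last matching index in an accumulator (objective: alternative; same O(n) cost).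

-- ===== PORT A =====
-- A's while loop: fuel k+1 ↔ loop entry with i = k; the body first sets i := i - 1,
-- then checks timestamps[-1] - timestamps[i] (i may be -1: Python wraps; index always
-- in range here, so pyGetD's default is never used).
def pvALoop (timestamps : List Int) (millis : Int) : Nat → Int
  | 0 => -1
  | k + 1 =>
    let i : Int := (k : Int) - 1
    let dif : Int := PySem.List.pyGetD timestamps (-1) 0 - PySem.List.pyGetD timestamps i 0
    if dif > millis then i else pvALoop timestamps millis k

def find_frame_index_ms_ago (timestamps : List Int) (millis : Int) : Int :=
  pvALoop timestamps millis timestamps.length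

-- ===== PORT B =====
def find_frame_index_ms_ago_alt (timestamps : List Int) (millis : Int) : Int :=
  if timestamps = [] then -1
  else
    let last := PySem.List.pyGetD timestamps (-1) 0
    (PySem.List.enumerate (PySem.List.slice timestamps none (some (-1))) 0).foldl
      (fun best it => if last - it.2 > millis then it.1 else best) (-1)

-- ===== PRECONDITION & SPEC =====
def Spec_find_frame_index_ms_ago (timestamps : List Int) (millis : Int) (out : Int) : Prop := out = find_frame_index_ms_ago_alt timestamps millis
instance (timestamps : List Int) (millis : Int) (out : Int) : Decidable (Spec_find_frame_index_ms_ago timestamps millis out) := by unfold Spec_find_frame_index_ms_ago; infer_instance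

-- ===== CLAIM (what is proved, stated in full; the proofs are below) =====
def Claim_equal_find_frame_index_ms_ago : Prop := ∀ (timestamps : List Int) (millis : Int), Dom_find_frame_index_ms_ago timestamps millis → Spec_find_frame_index_ms_ago timestamps millis (find_frame_index_ms_ago timestamps millis)

-- ===== LEMMAS AND PROOFS =====

lemma pvALoop_eq_foldl (ts : List Int) (millis : Int) :
    ∀ k, k < ts.length →
      pvALoop ts millis (k + 1) =
      (PySem.List.enumerate (ts.take k) 0).foldl
        (fun best it => if PySem.List.pyGetD ts (-1) 0 - it.2 > millis then it.1 else best) (-1) := by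
  intro k
  induction k with
  | zero =>
    intro _
    simp [pvALoop]
  | succ k ih =>
    intro hk
    have hk' : k < ts.length := Nat.lt_of_succ_lt hk
    have htake : ts.take (k + 1) = ts.take k ++ [ts[k]] := by
      rw [List.take_add_one]
      simp [List.getElem?_eq_getElem hk']
    rw [htake, PySem.List.enumerate_append, List.foldl_append]
    have hlen : (ts.take k).length = k := List.length_take_of_le hk'.le
    have hcast : ((k : Int) + 1) - 1 = (k : Int) := by ring
    show (let i : Int := ((k + 1 : Nat) : Int) - 1;
          let dif : Int := PySem.List.pyGetD ts (-1) 0 - PySem.List.pyGetD ts i 0;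
          if dif > millis then i else pvALoop ts millis (k + 1)) = _
    simp only [Nat.cast_add, Nat.cast_one, hcast, hlen, PySem.List.enumerate_cons,
      PySem.List.enumerate_nil, List.foldl_cons, List.foldl_nil]
    rw [ih hk']
    have hget : PySem.List.pyGetD ts (k : Int) 0 = ts[k] := by
      rw [PySem.List.pyGetD_natCast]; exact List.getD_eq_getElem _ _ hk'
    rw [hget]
    split <;> simp_all

-- ===== VERDICT (by name: the statement is the Claim_ definition above) =====
theorem find_frame_index_ms_ago_spec : Claim_equal_find_frame_index_ms_ago := by
  intro ts millis _
  unfold Spec_find_frame_index_ms_ago find_frame_index_ms_ago find_frame_index_ms_ago_alt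
  by_cases h : ts = []
  · subst h; simp [pvALoop]
  · have hlen : 0 < ts.length := List.length_pos_iff.mpr h
    have : ts.length = (ts.length - 1) + 1 := by omega
    rw [this, pvALoop_eq_foldl ts millis (ts.length - 1) (by omega)]
    simp [h, PySem.List.slice_to_neg_one, List.dropLast_eq_take]
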